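-- pv_equiv track=rewrite | github.com/le-eug/MATH3411 | test2/comma_code_decode.py | comma_code_decode
-- ===== SOURCE A (Python) =====
-- def get_symbol(comma_code: list[str], number_string: str) -> str:
--     for i, codeword in enumerate(comma_code):
--         if codeword == number_string:
--             return f's{i + 1}'
--     return ''
--
-- def comma_code_decode(comma_code: list[str], encoded_message: str) -> str:
--     message: str = ''
--
--     curr_num: str = ''
--     for digit in encoded_message:
--         curr_num += digit
--         if digit == '0':
--             message += get_symbol(comma_code, curr_num)
--             curr_num = ''
--
--     message += get_symbol(comma_code, curr_num) # could be one last symbol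
--
--     return message
-- ===== SOURCE B (Python) =====
-- def get_symbol(comma_code: list[str], number_string: str) -> str:
--     for i, codeword in enumerate(comma_code):
--         if codeword == number_string:
--             return f's{i + 1}'
--     return ''
--
-- def comma_code_decode(comma_code: list[str], encoded_message: str) -> str:
--     *body, last = encoded_message.split('0')
--     decoded = [get_symbol(comma_code, chunk + '0') for chunk in body]
--     decoded.append(get_symbol(comma_code, last))
--     return ''.join(decoded)
-- ===== Notes on version B (the rewrite author's own statement) =====
-- stated objective: simpler
-- what changed: A's incremental character-by-character scan with a running curr_num accumulator is replaced by splitting the message on '0' once (C-level str.split) and mapping a lookup over the chunks, re-appending '0' to every chunk but the last.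
import Mathlib
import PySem

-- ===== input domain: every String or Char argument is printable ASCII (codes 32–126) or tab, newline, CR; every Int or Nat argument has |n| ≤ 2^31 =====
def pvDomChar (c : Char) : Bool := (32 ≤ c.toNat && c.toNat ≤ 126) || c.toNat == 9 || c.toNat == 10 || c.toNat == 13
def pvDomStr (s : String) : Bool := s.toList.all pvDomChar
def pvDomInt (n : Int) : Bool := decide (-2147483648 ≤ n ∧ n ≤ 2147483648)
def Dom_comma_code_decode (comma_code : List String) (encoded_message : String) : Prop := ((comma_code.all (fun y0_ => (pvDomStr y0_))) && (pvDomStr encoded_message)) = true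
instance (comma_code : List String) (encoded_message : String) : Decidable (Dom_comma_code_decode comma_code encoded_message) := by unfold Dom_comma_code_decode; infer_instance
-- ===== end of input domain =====

-- B replaces A's incremental character-by-character delimiting scan with split('0')
-- followed by one map over the chunks (objective: simpler decomposition, same cost).

-- ===== PORT A =====
-- shared helper: both Pythons contain the identical get_symbol; strings handled as List Char
def get_symbol_go (number_string : List Char) : List (Int × String) → List Char
  | [] => []
  | (i, codeword) :: rest =>
    if codeword.toList = number_string then ("s" ++ PySem.Int.toStr (i + 1)).toList
    else get_symbol_go number_string rest

def get_symbol (comma_code : List String) (number_string : List Char) : List Char :=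
  get_symbol_go number_string (PySem.List.enumerate comma_code)

-- the body of A's 'for digit in encoded_message' loop, on state (message, curr_num)
def stepA (comma_code : List String) (st : List Char × List Char) (digit : Char) :
    List Char × List Char :=
  let curr := st.2 ++ [digit]
  if digit = '0' then (st.1 ++ get_symbol comma_code curr, []) else (st.1, curr)

def comma_code_decode (comma_code : List String) (encoded_message : String) : String :=
  let st := encoded_message.toList.foldl (stepA comma_code) ([], [])
  String.mk (st.1 ++ get_symbol comma_code st.2)

-- ===== PORT B =====
def comma_code_decode_alt (comma_code : List String) (encoded_message : String) : String :=
  let chunks := PySem.Chars.splitOn encoded_message.toList ['0']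
  let decoded := chunks.dropLast.map (fun chunk => get_symbol comma_code (chunk ++ ['0']))
  String.mk (PySem.Chars.join [] (decoded ++ [get_symbol comma_code (chunks.getLastD [])]))

-- ===== PRECONDITION & SPEC =====
def Spec_comma_code_decode (comma_code : List String) (encoded_message : String) (out : String) : Prop := out = comma_code_decode_alt comma_code encoded_message
instance (comma_code : List String) (encoded_message : String) (out : String) : Decidable (Spec_comma_code_decode comma_code encoded_message out) := by unfold Spec_comma_code_decode; infer_instance

-- ===== CLAIM (what is proved, stated in full; the proofs are below) =====
def Claim_equal_comma_code_decode : Prop := ∀ (comma_code : List String) (encoded_message : String), Dom_comma_code_decode comma_code encoded_message → Spec_comma_code_decode comma_code encoded_message (comma_code_decode comma_code encoded_message)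

-- ===== LEMMAS AND PROOFS =====

-- the natural structural recursion computing split-on-'0'
def split1 : List Char → List (List Char)
  | [] => [[]]
  | c :: r => if c = '0' then [] :: split1 r else (split1 r).modifyHead (c :: ·)

theorem split1_ne_nil (l : List Char) : split1 l ≠ [] := by
  cases l with
  | nil => simp [split1]
  | cons c r =>
    simp only [split1]
    split_ifs
    · simp
    · cases h : split1 r with
      | nil => exact absurd h (split1_ne_nil r)
      | cons a t => simp [List.modifyHead]

theorem modifyHead_nil_append (l : List (List Char)) :
    l.modifyHead (fun x => [] ++ x) = l := by
  cases l <;> simp [List.modifyHead]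

theorem splitOn_go_spec (fuel : Nat) (l cur : List Char) (acc : List (List Char))
    (h : l.length ≤ fuel) :
    PySem.Chars.splitOn.go ['0'] fuel l cur acc
      = acc.reverse ++ (split1 l).modifyHead (fun x => cur.reverse ++ x) := by
  induction fuel generalizing l cur acc with
  | zero =>
    have : l = [] := List.eq_nil_of_length_eq_zero (Nat.le_zero.mp h)
    subst this
    simp [PySem.Chars.splitOn.go, split1, List.modifyHead]
  | succ f ih =>
    cases l with
    | nil => simp [PySem.Chars.splitOn.go, split1, List.modifyHead]
    | cons c rest =>
      by_cases hc : c = '0'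
      · subst hc
        have hpre : List.isPrefixOf ['0'] ('0' :: rest) = true := by
          simp [List.isPrefixOf]
        simp only [PySem.Chars.splitOn.go, hpre, if_true, List.length_singleton,
          List.drop_one, List.tail_cons]
        rw [ih rest [] (cur.reverse :: acc) (by simpa using Nat.le_of_succ_le_succ h)]
        simp only [split1, List.modifyHead, List.reverse_cons,
          List.reverse_nil, List.nil_append, List.append_assoc, List.singleton_append]
        cases split1 rest <;> simp
      · have hpre : List.isPrefixOf ['0'] (c :: rest) = false := by
          simp only [List.isPrefixOf, Bool.and_eq_false_iff, beq_eq_false_iff_ne, ne_eq]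
          exact Or.inl fun h' => hc h'.symm
        simp only [PySem.Chars.splitOn.go, hpre, Bool.false_eq_true, if_false]
        rw [ih rest (c :: cur) acc (by simpa using Nat.le_of_succ_le_succ h)]
        simp only [split1, if_neg hc, List.modifyHead_modifyHead, List.reverse_cons]
        cases hsp : split1 rest with
        | nil => exact absurd hsp (split1_ne_nil rest)
        | cons a t => simp [List.modifyHead]

theorem splitOn_eq_split1 (l : List Char) :
    PySem.Chars.splitOn l ['0'] = split1 l := by
  show PySem.Chars.splitOn.go ['0'] (l.length + 1) l [] [] = _
  rw [splitOn_go_spec (l.length + 1) l [] [] (Nat.le_succ _)]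
  simpa using modifyHead_nil_append (split1 l)

theorem join_nil_eq_flatten : ∀ (xs : List (List Char)), PySem.Chars.join [] xs = xs.flatten
  | [] => rfl
  | [a] => by simp [PySem.Chars.join, List.intercalate]
  | a :: b :: u => by
      have ih := join_nil_eq_flatten (b :: u)
      simp only [PySem.Chars.join, List.intercalate, List.intersperse] at ih ⊢
      simp [ih]

-- B's value on the chunks of l, the first chunk prefixed by cur
def assembleB (cc : List String) (cur l : List Char) : List Char :=
  let parts := (split1 l).modifyHead (fun x => cur ++ x)
  (parts.dropLast.map (fun chunk => get_symbol cc (chunk ++ ['0']))).flatten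
    ++ get_symbol cc (parts.getLastD [])

theorem stepA_zero (cc : List String) (m cur : List Char) :
    stepA cc (m, cur) '0' = (m ++ get_symbol cc (cur ++ ['0']), []) := by
  simp [stepA]

theorem stepA_ne (cc : List String) (m cur : List Char) (c : Char) (hc : c ≠ '0') :
    stepA cc (m, cur) c = (m, cur ++ [c]) := by
  simp [stepA, hc]

theorem foldA_eq_assembleB (cc : List String) (l : List Char) :
    ∀ (m cur : List Char),
      (l.foldl (stepA cc) (m, cur)).1 ++ get_symbol cc (l.foldl (stepA cc) (m, cur)).2
      = m ++ assembleB cc cur l := by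
  induction l with
  | nil =>
    intro m cur
    simp [assembleB, split1, List.modifyHead]
  | cons c rest ih =>
    intro m cur
    by_cases hc : c = '0'
    · subst hc
      rw [List.foldl_cons, stepA_zero, ih]
      cases hsp : split1 rest with
      | nil => exact absurd hsp (split1_ne_nil rest)
      | cons a t =>
        simp [assembleB, split1, hsp, List.modifyHead, List.getLastD,
          List.dropLast_cons_of_ne_nil, List.append_assoc]
    · rw [List.foldl_cons, stepA_ne cc m cur c hc, ih]
      simp only [assembleB, split1, if_neg hc, List.modifyHead_modifyHead]
      cases hsp : split1 rest with
      | nil => exact absurd hsp (split1_ne_nil rest)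
      | cons a t => simp [List.modifyHead, List.append_assoc]

-- ===== VERDICT (by name: the statement is the Claim_ definition above) =====
theorem comma_code_decode_spec : Claim_equal_comma_code_decode := by
  intro cc msg _
  show comma_code_decode cc msg = comma_code_decode_alt cc msg
  simp only [comma_code_decode, comma_code_decode_alt, splitOn_eq_split1,
    join_nil_eq_flatten]
  rw [foldA_eq_assembleB cc msg.toList [] []]
  simp only [assembleB, List.nil_append]
  rw [show (fun x : List Char => x) = id from rfl, List.modifyHead_id, id]
  simp [List.flatten_append]
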